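-- pv_equiv track=rewrite | github.com/codeDeSyntax/blessedMusic | src/try.py | _intelligent_verse_splitting
-- ===== SOURCE A (Python) =====
-- def _intelligent_verse_splitting(lines):
--     """Split content into verses intelligently when no explicit markers exist."""
--     formatted_parts = []
--     verse_count = 1
--     current_verse_lines = []
--
--     for line in lines:
--         current_verse_lines.append(line)
--
--         # Split into new verse after about 4-6 lines or when we detect a pattern break
--         if len(current_verse_lines) >= 4:
--             # Check if this might be a good place to split
--             # (e.g., if the next few lines look like they might be a chorus or new verse)
--             formatted_parts.append(f'<p>Verse {verse_count}</p>')
--             for verse_line in current_verse_lines: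
--                 formatted_parts.append(f'<p>{verse_line}</p>')
--
--             verse_count += 1
--             current_verse_lines = []
--
--     # Handle remaining lines
--     if current_verse_lines:
--         formatted_parts.append(f'<p>Verse {verse_count}</p>')
--         for verse_line in current_verse_lines:
--             formatted_parts.append(f'<p>{verse_line}</p>')
--
--     return formatted_parts
-- ===== SOURCE B (Python) =====
-- def _intelligent_verse_splitting(lines):
--     """Split content into verses: slice off 4 lines at a time, format each chunk."""
--     lines = list(lines)
--     out = []
--     n = 1
--     while lines:
--         chunk, lines = lines[:4], lines[4:]
--         out.append(f'<p>Verse {n}</p>')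
--         out.extend(f'<p>{line}</p>' for line in chunk)
--         n += 1
--     return out
-- ===== Notes on version B (the rewrite author's own statement) =====
-- stated objective: simpler
-- what changed: Replaces A's line-by-line accumulator with a length test and a duplicated trailing-remainder block by a single loop that slices off 4 lines at a time; the final slice is naturally the leftover group.
import Mathlib
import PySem

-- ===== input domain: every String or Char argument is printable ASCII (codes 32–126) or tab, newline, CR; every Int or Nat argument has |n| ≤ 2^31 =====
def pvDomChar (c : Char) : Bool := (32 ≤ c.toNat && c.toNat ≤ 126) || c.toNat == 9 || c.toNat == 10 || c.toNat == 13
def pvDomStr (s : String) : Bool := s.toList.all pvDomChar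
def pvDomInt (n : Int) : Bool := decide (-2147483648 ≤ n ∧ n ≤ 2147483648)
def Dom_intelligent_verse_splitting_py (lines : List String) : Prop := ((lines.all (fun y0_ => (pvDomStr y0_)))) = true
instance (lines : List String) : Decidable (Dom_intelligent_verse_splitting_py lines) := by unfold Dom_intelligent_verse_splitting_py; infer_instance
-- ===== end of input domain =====

-- B replaces A's line-by-line accumulator (length test + duplicated trailing block) by one loop
-- slicing 4 lines at a time; same return value, proved equal on the whole domain.


-- f-string helpers shared by both ports (identical format strings in Source A and Source B)
def pvFmtVerse (n : Int) : String := "<p>Verse " ++ PySem.Int.toStr n ++ "</p>"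
def pvFmtLine (s : String) : String := "<p>" ++ s ++ "</p>"

-- ===== PORT A =====
-- the for-loop with state (formatted_parts, verse_count, current_verse_lines)
def pvALoop : List String → List String → Int → List String → List String
  | [], parts, count, cur =>
      -- 'if current_verse_lines:' trailing-remainder block
      if cur.isEmpty then parts
      else parts ++ pvFmtVerse count :: cur.map pvFmtLine
  | l :: rest, parts, count, cur =>
      let cur' := cur ++ [l]
      if cur'.length ≥ 4 then
        pvALoop rest (parts ++ pvFmtVerse count :: cur'.map pvFmtLine) (count + 1) []
      else
        pvALoop rest parts count cur'

def intelligent_verse_splitting_py (lines : List String) : List String :=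
  pvALoop lines [] 1 []

-- ===== PORT B =====
-- the while-loop: chunk, lines = lines[:4], lines[4:]
def pvBLoop (lines out : List String) (n : Int) : List String :=
  if h : lines = [] then out
  else
    pvBLoop (PySem.List.slice lines (some 4) none)
            (out ++ pvFmtVerse n :: (PySem.List.slice lines none (some 4)).map pvFmtLine)
            (n + 1)
termination_by lines.length
decreasing_by
  rw [PySem.List.slice_from lines (by norm_num : (0:Int) ≤ 4)]
  cases lines with
  | nil => exact absurd rfl h
  | cons x xs => simp

def intelligent_verse_splitting_py_alt (lines : List String) : List String :=
  pvBLoop lines [] 1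

-- ===== PRECONDITION & SPEC =====
def Spec_intelligent_verse_splitting_py (lines : List String) (out : List String) : Prop := out = intelligent_verse_splitting_py_alt lines
instance (lines : List String) (out : List String) : Decidable (Spec_intelligent_verse_splitting_py lines out) := by unfold Spec_intelligent_verse_splitting_py; infer_instance

-- ===== CLAIM (what is proved, stated in full; the proofs are below) =====
def Claim_equal_intelligent_verse_splitting_py : Prop := ∀ (lines : List String), Dom_intelligent_verse_splitting_py lines → Spec_intelligent_verse_splitting_py lines (intelligent_verse_splitting_py lines)

-- ===== LEMMAS AND PROOFS =====

lemma pvBLoop_nil (out : List String) (n : Int) : pvBLoop [] out n = out := by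
  rw [pvBLoop.eq_def]; simp

-- A's loop started on an empty accumulator equals B's chunking loop
theorem pvLoop_eq (lines : List String) (parts : List String) (n : Int) :
    pvALoop lines parts n [] = pvBLoop lines parts n := by
  match lines with
  | [] => rw [pvBLoop.eq_def]; simp [pvALoop]
  | [a] =>
      rw [pvBLoop.eq_def]
      simp [pvALoop, PySem.List.slice_from _ (by norm_num : (0:Int) ≤ 4),
            PySem.List.slice_to _ (by norm_num : (0:Int) ≤ 4), pvBLoop_nil]
  | [a, b] =>
      rw [pvBLoop.eq_def]
      simp [pvALoop, PySem.List.slice_from _ (by norm_num : (0:Int) ≤ 4),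
            PySem.List.slice_to _ (by norm_num : (0:Int) ≤ 4), pvBLoop_nil]
  | [a, b, c] =>
      rw [pvBLoop.eq_def]
      simp [pvALoop, PySem.List.slice_from _ (by norm_num : (0:Int) ≤ 4),
            PySem.List.slice_to _ (by norm_num : (0:Int) ≤ 4), pvBLoop_nil]
  | a :: b :: c :: d :: rest =>
      rw [pvBLoop.eq_def]
      have ih := pvLoop_eq rest (parts ++ pvFmtVerse n :: ([a, b, c, d]).map pvFmtLine) (n + 1)
      simpa [pvALoop, PySem.List.slice_from _ (by norm_num : (0:Int) ≤ 4),
             PySem.List.slice_to _ (by norm_num : (0:Int) ≤ 4)] using ih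
termination_by lines.length
decreasing_by simp; omega

-- ===== VERDICT (by name: the statement is the Claim_ definition above) =====
theorem intelligent_verse_splitting_py_spec : Claim_equal_intelligent_verse_splitting_py := by
  intro lines _
  unfold Spec_intelligent_verse_splitting_py intelligent_verse_splitting_py intelligent_verse_splitting_py_alt
  exact pvLoop_eq lines [] 1
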